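-- pv_equiv track=rewrite | github.com/wohahiha/Hamming-BCH-McEliece | hamming_mceliece/hamming_code.py | mat_left_mul
-- ===== SOURCE A (Python) =====
-- from typing import List, Tuple, Optional
--
-- def mat_left_mul(A_rows: List[int], B_rows: List[int], k: int) -> List[int]:
--     out: List[int] = []
--     for arow in A_rows:
--         acc = 0
--         x = arow
--         while x:
--             lsb = x & -x
--             i = lsb.bit_length() - 1
--             acc ^= B_rows[i]
--             x ^= lsb
--         out.append(acc)
--     return out
-- ===== SOURCE B (Python) =====
-- from typing import List
--
-- def mat_left_mul(A_rows: List[int], B_rows: List[int], k: int) -> List[int]: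
--     # Method of four Russians: precompute per-8-row-block subset-XOR tables,
--     # then each product row is one masked byte-indexed table lookup per block.
--     # Only as many blocks as the widest mask in A_rows actually reaches are built.
--     W = 8
--     maxbits = 0
--     for a in A_rows:
--         bl = a.bit_length()
--         if bl > maxbits:
--             maxbits = bl
--     nblocks = min((len(B_rows) + W - 1) // W, (maxbits + W - 1) // W)
--     tables: List[List[int]] = []
--     for b in range(nblocks):
--         t = [0]
--         for row in B_rows[b * W:(b + 1) * W]:
--             t += [v ^ row for v in t]
--         tables.append(t)
--     out: List[int] = []
--     for arow in A_rows:
--         acc = 0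
--         x = arow
--         for t in tables:
--             acc ^= t[x & (len(t) - 1)]
--             x >>= W
--         out.append(acc)
--     return out
-- ===== Notes on version B (the rewrite author's own statement) =====
-- stated objective: faster
-- what changed: B replaces A's per-row lowest-set-bit extraction loop by the method of four Russians: it precomputes, for each 8-row block of B_rows (only up to the largest bit length occurring in A_rows), a 256-entry subset-XOR table, then computes each output row by one masked byte-indexed table lookup per block instead of one list access and big-int XOR per set bit; intended as faster -- a timing run measured B about 2x faster than A at the larger sizes, though the measurement varies between runs.
import Mathlib
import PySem

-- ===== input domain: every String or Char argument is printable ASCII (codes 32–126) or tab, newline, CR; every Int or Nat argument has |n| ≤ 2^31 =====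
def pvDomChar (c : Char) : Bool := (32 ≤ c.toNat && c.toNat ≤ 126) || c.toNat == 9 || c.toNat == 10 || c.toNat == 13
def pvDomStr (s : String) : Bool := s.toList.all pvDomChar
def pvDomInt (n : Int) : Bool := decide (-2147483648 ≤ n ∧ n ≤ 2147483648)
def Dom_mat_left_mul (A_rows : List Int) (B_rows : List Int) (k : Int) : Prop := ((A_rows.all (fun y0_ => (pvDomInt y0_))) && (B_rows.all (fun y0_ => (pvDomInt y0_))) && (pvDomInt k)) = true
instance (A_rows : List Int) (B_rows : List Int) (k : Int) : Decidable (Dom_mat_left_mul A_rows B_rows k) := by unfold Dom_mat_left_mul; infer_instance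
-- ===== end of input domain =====

-- B replaces A's per-row lowest-set-bit XOR loop by the method of four Russians:
-- precomputed 256-entry subset-XOR tables per 8-row block of B_rows, one masked
-- byte lookup per block per output row (objective: faster).


-- ===== PORT A =====
-- A's inner 'while x' loop. The fuel argument is only a totality guard: for
-- x > 0 the loop runs at most popcount(x) ≤ x steps, so fuel = x.natAbs + 1
-- never runs out on inputs admitted by Pre_; for x < 0 Python diverges
-- (excluded by Pre_).
def matInnerA (B_rows : List Int) : Nat → Int → Int → Int
  | 0, _, acc => acc
  | fuel + 1, x, acc =>
    if x = 0 then acc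
    else
      let lsb := PySem.Int.band x (-x)
      let i : Int := (PySem.Int.bitLength lsb : Int) - 1
      matInnerA B_rows fuel (PySem.Int.bxor x lsb)
        (PySem.Int.bxor acc ((PySem.List.pyGet? B_rows i).getD 0))

def mat_left_mul (A_rows : List Int) (B_rows : List Int) (k : Int) : List Int :=
  A_rows.map (fun arow => matInnerA B_rows (arow.natAbs + 1) arow 0)

-- ===== PORT B =====
-- 't = [0]; for row in block: t += [v ^ row for v in t]'
def pvBuildTable (block : List Int) : List Int :=
  block.foldl (fun t row => t ++ t.map (fun v => PySem.Int.bxor v row)) [0]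

def mat_left_mul_alt (A_rows : List Int) (B_rows : List Int) (k : Int) : List Int :=
  let maxbits : Int := A_rows.foldl
    (fun mb a => if ((PySem.Int.bitLength a : Nat) : Int) > mb then ((PySem.Int.bitLength a : Nat) : Int) else mb) 0
  let nblocks : Int := min (PySem.Int.floordiv ((B_rows.length : Int) + 8 - 1) 8)
    (PySem.Int.floordiv (maxbits + 8 - 1) 8)
  let tables : List (List Int) :=
    (PySem.List.pyRange 0 nblocks 1).map (fun b =>
      pvBuildTable (PySem.List.slice B_rows (some (b * 8)) (some ((b + 1) * 8))))
  A_rows.map (fun arow =>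
    (tables.foldl (fun (st : Int × Int) t =>
        (PySem.Int.bxor st.1
          ((PySem.List.pyGet? t (PySem.Int.band st.2 ((t.length : Int) - 1))).getD 0),
         st.2 >>> (8 : Nat)))
      ((0 : Int), arow)).1)

-- ===== PRECONDITION & SPEC =====
-- Pre_ is exactly where Python A returns: a negative row makes A's while-loop
-- diverge, and a row with a set bit at index ≥ len(B_rows) makes A raise
-- IndexError (B instead ignores such out-of-range bits, so those inputs are excluded).
def Pre_mat_left_mul (A_rows : List Int) (B_rows : List Int) (k : Int) : Prop :=
  ∀ a ∈ A_rows, 0 ≤ a ∧ a < 2 ^ B_rows.length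
instance (A_rows : List Int) (B_rows : List Int) (k : Int) : Decidable (Pre_mat_left_mul A_rows B_rows k) := by unfold Pre_mat_left_mul; infer_instance

def pvWitness_mat_left_mul : List Int × List Int × Int := ([3, 5, 0], [1, 2, -3], 3)

def Spec_mat_left_mul (A_rows : List Int) (B_rows : List Int) (k : Int) (out : List Int) : Prop := out = mat_left_mul_alt A_rows B_rows k
instance (A_rows : List Int) (B_rows : List Int) (k : Int) (out : List Int) : Decidable (Spec_mat_left_mul A_rows B_rows k out) := by unfold Spec_mat_left_mul; infer_instance

-- ===== CLAIM (what is proved, stated in full; the proofs are below) =====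
def Claim_equal_mat_left_mul : Prop := ∀ (A_rows : List Int) (B_rows : List Int) (k : Int), Dom_mat_left_mul A_rows B_rows k → Pre_mat_left_mul A_rows B_rows k → Spec_mat_left_mul A_rows B_rows k (mat_left_mul A_rows B_rows k)

-- ===== LEMMAS AND PROOFS =====

-- XOR algebra for PySem.Int.bxor (matches Mathlib's Int.xor constructor-wise; no
-- associativity lemma for it exists in the library, so we derive one).
lemma pvBxor_eq (a b : Int) : PySem.Int.bxor a b = Int.xor a b := by
  cases a with
  | ofNat m =>
    cases b with
    | ofNat n => simp [PySem.Int.bxor, Int.xor]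
    | negSucc n => simp [PySem.Int.bxor, Int.xor, Int.negSucc_eq]; omega
  | negSucc m =>
    cases b with
    | ofNat n => simp [PySem.Int.bxor, Int.xor, Int.negSucc_eq]; omega
    | negSucc n => simp [PySem.Int.bxor, Int.xor, Int.negSucc_eq]; omega

lemma pvXor_assoc (a b c : Int) : Int.xor (Int.xor a b) c = Int.xor a (Int.xor b c) := by
  cases a <;> cases b <;> cases c <;> simp [Int.xor, Nat.xor_assoc]

lemma pvBxor_assoc (a b c : Int) :
    PySem.Int.bxor (PySem.Int.bxor a b) c = PySem.Int.bxor a (PySem.Int.bxor b c) := by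
  simp [pvBxor_eq, pvXor_assoc]

lemma pvBxor_zero_left (a : Int) : PySem.Int.bxor 0 a = a := by
  rw [PySem.Int.bxor_comm]; simp

-- ascending bit scan over B_rows: the common reference both ports are reduced to
def pvScan (rows : List Int) (i m : Nat) : Int :=
  if h : m = 0 then 0
  else
    PySem.Int.bxor (if m % 2 = 1 then (PySem.List.pyGet? rows (i : Int)).getD 0 else 0)
      (pvScan rows (i + 1) (m / 2))
termination_by m
decreasing_by exact Nat.div_lt_self (Nat.pos_of_ne_zero h) one_lt_two

-- XOR of the rows of `block` selected by the set bits of m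
def pvXorSel : List Int → Nat → Int
  | [], _ => 0
  | r :: rs, m => PySem.Int.bxor (if m % 2 = 1 then r else 0) (pvXorSel rs (m / 2))

lemma pvScan_zero (rows : List Int) (i : Nat) : pvScan rows i 0 = 0 := by
  rw [pvScan]; simp

lemma pvXorSel_zero (bl : List Int) : pvXorSel bl 0 = 0 := by
  induction bl with
  | nil => rfl
  | cons r rs ih => simp [pvXorSel, ih]

-- ===== A-side: matInnerA equals the bit scan =====

-- bits of (2c+1)<<<i AND ((2c+1)<<<i - 1) = (2c)<<<i : clearing the lowest set bit
lemma land_pred_odd_shift (c i : Nat) :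
    ((2 * c + 1) <<< i) &&& ((2 * c + 1) <<< i - 1) = (2 * c) <<< i := by
  induction i with
  | zero =>
    simp only [Nat.shiftLeft_zero]
    apply Nat.eq_of_testBit_eq
    intro j
    cases j with
    | zero =>
      simp [Nat.testBit_zero]
    | succ j =>
      rw [Nat.testBit_land, Nat.testBit_succ, Nat.testBit_succ, Nat.testBit_succ]
      have h1 : (2 * c + 1) / 2 = c := by omega
      have h2 : (2 * c + 1 - 1) / 2 = c := by omega
      have h3 : (2 * c) / 2 = c := by omega
      rw [h1, h2, h3, Bool.and_self]
  | succ i ih =>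
    have hn : 0 < (2 * c + 1) <<< i := by
      rw [Nat.shiftLeft_eq]; positivity
    have e1 : (2 * c + 1) <<< (i + 1) = 2 * ((2 * c + 1) <<< i) := by
      rw [Nat.shiftLeft_eq, Nat.shiftLeft_eq, pow_succ]; ring
    have e2 : (2 * c) <<< (i + 1) = 2 * ((2 * c) <<< i) := by
      rw [Nat.shiftLeft_eq, Nat.shiftLeft_eq, pow_succ]; ring
    rw [e1, e2]
    apply Nat.eq_of_testBit_eq
    intro j
    cases j with
    | zero =>
      simp [Nat.testBit_zero]
    | succ j =>
      rw [Nat.testBit_land, Nat.testBit_succ, Nat.testBit_succ, Nat.testBit_succ]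
      have h1 : 2 * ((2 * c + 1) <<< i) / 2 = (2 * c + 1) <<< i := by omega
      have h2 : (2 * ((2 * c + 1) <<< i) - 1) / 2 = (2 * c + 1) <<< i - 1 := by omega
      have h3 : 2 * ((2 * c) <<< i) / 2 = (2 * c) <<< i := by omega
      rw [h1, h2, h3, ← Nat.testBit_land, ih]

-- XOR with the lowest set bit clears it
lemma xor_two_pow_odd_shift (c i : Nat) :
    ((2 * c + 1) <<< i) ^^^ 2 ^ i = (2 * c) <<< i := by
  apply Nat.eq_of_testBit_eq
  intro j
  rw [Nat.testBit_xor, Nat.testBit_shiftLeft, Nat.testBit_shiftLeft, Nat.testBit_two_pow]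
  rcases lt_trichotomy j i with h | h | h
  · have hne : i ≠ j := by omega
    simp [Nat.not_le.mpr h, hne]
  · subst h
    simp [Nat.testBit_zero]
  · have hji : j ≥ i := le_of_lt h
    have hne : i ≠ j := by omega
    simp only [ge_iff_le, hji, decide_true, Bool.true_and, hne, decide_false, Bool.xor_false]
    have : j - i = (j - i - 1) + 1 := by omega
    rw [this, Nat.testBit_succ, Nat.testBit_succ]
    have h1 : (2 * c + 1) / 2 = c := by omega
    have h2 : (2 * c) / 2 = c := by omega
    rw [h1, h2]

-- PySem.Int.band of a positive n with -n, in Nat terms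
lemma band_neg_self (n : Nat) (h : 0 < n) :
    PySem.Int.band (n : Int) (-(n : Int)) = ((n - (n &&& (n - 1)) : Nat) : Int) := by
  unfold PySem.Int.band
  rw [if_pos (by positivity : (0 : Int) ≤ (n : Int)), if_neg (by omega : ¬ (0 : Int) ≤ -(n : Int))]
  simp only [neg_neg]
  have e1 : ((n : Int)).toNat = n := by omega
  have e2 : ((n : Int) - 1).toNat = n - 1 := by omega
  rw [e1, e2]

lemma bitLength_two_pow (i : Nat) :
    PySem.Int.bitLength ((2 ^ i : Nat) : Int) = i + 1 := by
  induction i with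
  | zero => decide
  | succ i ih =>
    rw [PySem.Int.bitLength_natCast (m := 2 ^ (i + 1)) (by positivity)]
    have : 2 ^ (i + 1) / 2 = 2 ^ i := by
      rw [pow_succ]; omega
    rw [this, ih]

-- the bridge: A's lsb-extraction loop on m <<< i equals the ascending bit scan at index i
lemma inner_bridge (rows : List Int) :
    ∀ m : Nat, ∀ (i : Nat) (acc : Int) (fa : Nat), m ≤ fa →
      matInnerA rows fa ((m <<< i : Nat) : Int) acc
        = PySem.Int.bxor acc (pvScan rows i m) := by
  intro m
  induction m using Nat.strong_induction_on with
  | _ m ih =>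
    intro i acc fa hfa
    rcases Nat.eq_zero_or_pos m with hm | hm
    · subst hm
      rw [pvScan_zero]
      cases fa <;> simp [matInnerA]
    · rcases Nat.even_or_odd m with ⟨a, ha⟩ | ⟨c, hc⟩
      · -- m = 2a even: the scan skips, A's argument is rewritten as a <<< (i+1)
        have hsc : pvScan rows i m = pvScan rows (i + 1) a := by
          rw [pvScan, dif_neg (by omega)]
          have h2 : m % 2 = 0 := by omega
          have h3 : m / 2 = a := by omega
          rw [if_neg (by omega), h3, pvBxor_zero_left]
        have harg : (m <<< i) = (a <<< (i + 1)) := by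
          rw [Nat.shiftLeft_eq, Nat.shiftLeft_eq, pow_succ, ha]; ring
        rw [hsc, harg]
        exact ih a (by omega) (i + 1) acc fa (by omega)
      · -- m = 2c+1 odd: A steps, clearing the lowest set bit at position i
        subst hc
        have hpos : 0 < (2 * c + 1) <<< i := by rw [Nat.shiftLeft_eq]; positivity
        obtain ⟨fa', rfl⟩ : ∃ fa', fa = fa' + 1 := ⟨fa - 1, by omega⟩
        have hxA : (((2 * c + 1) <<< i : Nat) : Int) ≠ 0 := by positivity
        have hlsb : PySem.Int.band (((2 * c + 1) <<< i : Nat) : Int)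
            (-(((2 * c + 1) <<< i : Nat) : Int)) = ((2 ^ i : Nat) : Int) := by
          rw [band_neg_self _ hpos, land_pred_odd_shift]
          have e : (2 * c + 1) <<< i = (2 * c) <<< i + 2 ^ i := by
            rw [Nat.shiftLeft_eq, Nat.shiftLeft_eq]; ring
          have hp : 1 ≤ 2 ^ i := Nat.one_le_two_pow
          have key : (2 * c + 1) <<< i - (2 * c) <<< i = 2 ^ i := by omega
          rw [key]
        have hidx : ((PySem.Int.bitLength ((2 ^ i : Nat) : Int) : Int)) - 1 = (i : Int) := by
          rw [bitLength_two_pow]; push_cast; ring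
        have hxor : PySem.Int.bxor (((2 * c + 1) <<< i : Nat) : Int) ((2 ^ i : Nat) : Int)
            = ((c <<< (i + 1) : Nat) : Int) := by
          have key2 : (2 * c) <<< i = c <<< (i + 1) := by
            rw [Nat.shiftLeft_eq, Nat.shiftLeft_eq, pow_succ]; ring
          rw [PySem.Int.bxor_natCast, xor_two_pow_odd_shift, key2]
        have hsc : pvScan rows i (2 * c + 1)
            = PySem.Int.bxor ((PySem.List.pyGet? rows (i : Int)).getD 0)
                (pvScan rows (i + 1) c) := by
          rw [pvScan, dif_neg (by omega)]
          have h2 : (2 * c + 1) % 2 = 1 := by omega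
          have h3 : (2 * c + 1) / 2 = c := by omega
          rw [if_pos h2, h3]
        rw [matInnerA]
        simp only [if_neg hxA]
        rw [hlsb, hidx, hxor]
        rw [ih c (by omega) (i + 1) _ fa' (by omega)]
        rw [hsc, pvBxor_assoc]

-- ===== B-side: the table fold equals the bit scan =====

-- length of the subset-XOR table fold
lemma pvTable_length (block : List Int) :
    ∀ init : List Int,
      (block.foldl (fun t row => t ++ t.map (fun v => PySem.Int.bxor v row)) init).length
        = init.length * 2 ^ block.length := by
  induction block with
  | nil => intro init; simp
  | cons r rs ih =>
    intro init
    rw [List.foldl_cons, ih]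
    simp [List.length_append, pow_succ]
    ring

-- entries of the subset-XOR table fold
lemma pvTable_get (block : List Int) :
    ∀ (init : List Int) (i m : Nat), i < init.length → m < 2 ^ block.length →
      (block.foldl (fun t row => t ++ t.map (fun v => PySem.Int.bxor v row)) init)[i + init.length * m]?
        = some (PySem.Int.bxor (init.getD i 0) (pvXorSel block m)) := by
  induction block with
  | nil =>
    intro init i m hi hm
    have hm0 : m = 0 := by simp at hm; omega
    subst hm0
    simp only [List.foldl_nil, Nat.mul_zero, Nat.add_zero, pvXorSel, PySem.Int.bxor_zero]
    rw [List.getD_eq_getElem?_getD, List.getElem?_eq_getElem hi]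
    rfl
  | cons r rs ih =>
    intro init i m hi hm
    rw [List.foldl_cons]
    set init' := init ++ init.map (fun v => PySem.Int.bxor v r) with hinit'
    have hlen' : init'.length = 2 * init.length := by simp [hinit']; ring
    have hm' : m / 2 < 2 ^ rs.length := by
      have : m < 2 * 2 ^ rs.length := by
        have := hm; rw [List.length_cons, pow_succ] at this; omega
      omega
    rcases Nat.even_or_odd m with ⟨a, hma⟩ | ⟨a, hma⟩
    · have hb0 : m % 2 = 0 := by omega
      have hidx : i + init.length * m = i + init'.length * (m / 2) := by
        have hm2 : m = 2 * (m / 2) := by omega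
        rw [hlen']
        conv_lhs => rw [hm2]
        ring
      rw [hidx, ih init' i (m / 2) (by omega) hm']
      have hget : init'.getD i 0 = init.getD i 0 := by
        rw [hinit', List.getD_eq_getElem?_getD, List.getD_eq_getElem?_getD,
          List.getElem?_append_left hi]
      rw [hget, pvXorSel, if_neg (by omega), pvBxor_zero_left]
    · have hb1 : m % 2 = 1 := by omega
      have hidx : i + init.length * m = (init.length + i) + init'.length * (m / 2) := by
        have hm2 : m = 2 * (m / 2) + 1 := by omega
        rw [hlen']
        conv_lhs => rw [hm2]
        ring
      rw [hidx, ih init' (init.length + i) (m / 2) (by rw [hlen']; omega) hm']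
      have hget : init'.getD (init.length + i) 0
          = PySem.Int.bxor (init.getD i 0) r := by
        rw [hinit', List.getD_eq_getElem?_getD, List.getD_eq_getElem?_getD,
          List.getElem?_append_right (by omega)]
        simp only [Nat.add_sub_cancel_left, List.getElem?_map,
          List.getElem?_eq_getElem hi]
        rfl
      rw [hget, pvXorSel, if_pos hb1, pvBxor_assoc]

-- pvBuildTable lookup
lemma pvBuildTable_get (block : List Int) (j : Nat) (hj : j < 2 ^ block.length) :
    (pvBuildTable block)[j]? = some (pvXorSel block j) := by
  have := pvTable_get block [0] 0 j (by simp) hj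
  simpa [pvBuildTable, pvBxor_zero_left] using this

lemma pvBuildTable_length (block : List Int) :
    (pvBuildTable block).length = 2 ^ block.length := by
  have := pvTable_length block [0]
  simpa [pvBuildTable] using this

-- the scan of the first t bits is the subset-XOR of the corresponding block
lemma pvScan_take (rows : List Int) :
    ∀ (t i j : Nat), j < 2 ^ t →
      pvScan rows i j = pvXorSel ((rows.drop i).take t) j := by
  intro t
  induction t with
  | zero =>
    intro i j hj
    have hj0 : j = 0 := by simp at hj; omega
    subst hj0
    rw [pvScan_zero]
    simp [pvXorSel_zero]
  | succ t ih =>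
    intro i j hj
    rcases Nat.eq_zero_or_pos j with hj0 | hj0
    · subst hj0; rw [pvScan_zero, pvXorSel_zero]
    · rw [pvScan, dif_neg (by omega)]
      have hj' : j / 2 < 2 ^ t := by
        have : j < 2 * 2 ^ t := by rw [pow_succ] at hj; omega
        omega
      rcases hdrop : rows.drop i with _ | ⟨r, rest⟩
      · have hge : rows.length ≤ i := List.drop_eq_nil_iff.mp hdrop
        have hnone : PySem.List.pyGet? rows (i : Int) = rows[i]? :=
          PySem.List.pyGet?_natCast rows i
        have hnone' : rows[i]? = none := List.getElem?_eq_none hge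
        have hdrop' : rows.drop (i + 1) = [] := by
          apply List.drop_eq_nil_iff.mpr; omega
        rw [ih (i + 1) (j / 2) hj', hdrop']
        simp [pvXorSel, hnone, hnone']
      · have hi : i < rows.length := by
          by_contra hcon
          rw [List.drop_eq_nil_iff.mpr (by omega)] at hdrop
          exact absurd hdrop (by simp)
        have hr : rows[i]? = some r := by
          have h0 : (List.drop i rows)[0]? = rows[i + 0]? := List.getElem?_drop
          rw [hdrop] at h0
          simpa using h0.symm
        have hget : PySem.List.pyGet? rows (i : Int) = some r := by
          rw [PySem.List.pyGet?_natCast, hr]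
        have hrest : rows.drop (i + 1) = rest := by
          have h1 := congrArg (List.drop 1) hdrop
          rw [List.drop_drop] at h1
          simpa [Nat.add_comm] using h1
        rw [ih (i + 1) (j / 2) hj', hrest, List.take_succ_cons, pvXorSel, hget]
        rfl

-- splitting the scan at bit position 8
lemma pvScan_split8 (rows : List Int) (i m : Nat) :
    pvScan rows i m
      = PySem.Int.bxor (pvScan rows i (m % 2 ^ 8)) (pvScan rows (i + 8) (m / 2 ^ 8)) := by
  suffices h : ∀ (L i m : Nat),
      pvScan rows i m
        = PySem.Int.bxor (pvScan rows i (m % 2 ^ L)) (pvScan rows (i + L) (m / 2 ^ L)) by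
    exact h 8 i m
  intro L
  induction L with
  | zero =>
    intro i m
    rw [Nat.pow_zero, Nat.mod_one, Nat.div_one, pvScan_zero, pvBxor_zero_left, Nat.add_zero]
  | succ L ih =>
    intro i m
    rcases Nat.eq_zero_or_pos m with hm | hm
    · subst hm; simp [pvScan_zero]
    · have hmod : m % 2 ^ (L + 1) = m % 2 + 2 * (m / 2 % 2 ^ L) := by
        rw [pow_succ, Nat.mul_comm, Nat.mod_mul]
      have hdiv : m / 2 ^ (L + 1) = m / 2 / 2 ^ L := by
        rw [pow_succ, Nat.mul_comm, Nat.div_div_eq_div_mul]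
      rw [pvScan, dif_neg (by omega), ih (i + 1) (m / 2)]
      rcases Nat.eq_zero_or_pos (m % 2 ^ (L + 1)) with hz | hz
      · -- low part is zero: m % 2 = 0 and (m/2) % 2^L = 0
        have h2 : m % 2 = 0 := by omega
        have hL : m / 2 % 2 ^ L = 0 := by omega
        rw [hz, pvScan_zero, pvBxor_zero_left, hL, pvScan_zero, pvBxor_zero_left,
          if_neg (by omega), pvBxor_zero_left, hdiv]
        have : i + 1 + L = i + (L + 1) := by omega
        rw [this]
      · conv_rhs => rw [pvScan, dif_neg (by omega)]
        have h2 : m % 2 ^ (L + 1) % 2 = m % 2 := by omega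
        have h3 : m % 2 ^ (L + 1) / 2 = m / 2 % 2 ^ L := by omega
        rw [h2, h3, hdiv, ← pvBxor_assoc]
        have : i + 1 + L = i + (L + 1) := by omega
        rw [this]

-- ===== assembling the per-row fold =====

-- one Nat-level description of B's per-row fold over the block tables
lemma pvFold_eq_scan (rows : List Int) (E : Nat) (hEn : E ≤ (rows.length + 7) / 8) :
    ∀ (d bIdx : Nat) (x : Nat) (acc : Int),
      E = bIdx + d →
      x < 2 ^ (rows.length - 8 * bIdx) →
      x < 2 ^ (8 * d) →
      ((PySem.List.pyRange (bIdx : Int) ((E : Nat) : Int) 1).foldl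
          (fun (st : Int × Int) b =>
            (PySem.Int.bxor st.1
              ((PySem.List.pyGet?
                  (pvBuildTable (PySem.List.slice rows (some (b * 8)) (some ((b + 1) * 8))))
                  (PySem.Int.band st.2
                    (((pvBuildTable (PySem.List.slice rows (some (b * 8)) (some ((b + 1) * 8)))).length : Int) - 1))).getD 0),
             st.2 >>> (8 : Nat)))
          (acc, (x : Int))).1
        = PySem.Int.bxor acc (pvScan rows (8 * bIdx) x) := by
  intro d
  induction d with
  | zero =>
    intro bIdx x acc hE hx hx2
    have hnil : PySem.List.pyRange (bIdx : Int) ((E : Nat) : Int) 1 = [] := by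
      apply PySem.List.pyRange_one_eq_nil
      omega
    have hx0 : x = 0 := by
      simp at hx2; omega
    subst hx0
    rw [hnil, List.foldl_nil, pvScan_zero]
    simp
  | succ d ih =>
    intro bIdx x acc hE hx hx2
    have hlt : (bIdx : Int) < ((E : Nat) : Int) := by
      push_cast; omega
    rw [PySem.List.pyRange_one_cons hlt, List.foldl_cons]
    -- describe the block and its table
    have hb8 : (bIdx : Int) * 8 = ((8 * bIdx : Nat) : Int) := by push_cast; ring
    have hb8' : ((bIdx : Int) + 1) * 8 = ((8 * bIdx : Nat) : Int) + ((8 : Nat) : Int) := by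
      push_cast; ring
    have hslice : PySem.List.slice rows (some ((bIdx : Int) * 8)) (some (((bIdx : Int) + 1) * 8))
        = (rows.drop (8 * bIdx)).take 8 := by
      rw [hb8, hb8', PySem.List.slice_natCast_add]
    set block := (rows.drop (8 * bIdx)).take 8 with hblock
    have hL : block.length = min 8 (rows.length - 8 * bIdx) := by
      simp [hblock]
    have hLpos : 0 < block.length := by
      rw [hL]
      have hb : bIdx < E := by omega
      have : 8 * bIdx < rows.length := by omega
      omega
    have htlen : (pvBuildTable block).length = 2 ^ block.length := pvBuildTable_length block
    -- the masked index is x % 2^L, which equals x % 256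
    have hxmod : x % 2 ^ block.length = x % 2 ^ 8 := by
      rcases le_or_gt 8 (rows.length - 8 * bIdx) with hbig | hsmall
      · have : block.length = 8 := by omega
        rw [this]
      · have hLs : block.length = rows.length - 8 * bIdx := by omega
        have hxs : x < 2 ^ block.length := by rw [hLs]; exact hx
        have hxs8 : x < 2 ^ 8 := lt_of_lt_of_le hxs (Nat.pow_le_pow_right (by omega) (by omega))
        rw [Nat.mod_eq_of_lt hxs, Nat.mod_eq_of_lt hxs8]
    have hmask : PySem.Int.band ((x : Nat) : Int) (((pvBuildTable block).length : Int) - 1)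
        = ((x % 2 ^ block.length : Nat) : Int) := by
      have h1 : ((pvBuildTable block).length : Int) - 1 = ((2 ^ block.length - 1 : Nat) : Int) := by
        rw [htlen]
        have : (1 : Nat) ≤ 2 ^ block.length := Nat.one_le_two_pow
        push_cast [this]
        ring
      rw [h1, PySem.Int.band_natCast, Nat.and_two_pow_sub_one_eq_mod]
    have hlook : (PySem.List.pyGet? (pvBuildTable block)
        (((x % 2 ^ block.length : Nat) : Int))).getD 0 = pvXorSel block (x % 2 ^ block.length) := by
      rw [PySem.List.pyGet?_natCast,
        pvBuildTable_get block _ (Nat.mod_lt _ (by positivity)), Option.getD_some]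
    -- the shifted remainder
    have hshift : ((x : Nat) : Int) >>> (8 : Nat) = ((x / 2 ^ 8 : Nat) : Int) := by
      rw [← Int.natCast_shiftRight]
      congr 1
      simp [Nat.shiftRight_eq_div_pow]
    have hx' : x / 2 ^ 8 < 2 ^ (rows.length - 8 * (bIdx + 1)) := by
      rcases le_or_gt 8 (rows.length - 8 * bIdx) with hbig | hsmall
      · have hsplit : 2 ^ (rows.length - 8 * bIdx)
            = 2 ^ (rows.length - 8 * (bIdx + 1)) * 2 ^ 8 := by
          rw [← pow_add]
          congr 1
          omega
        rw [Nat.div_lt_iff_lt_mul (by positivity)]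
        calc x < 2 ^ (rows.length - 8 * bIdx) := hx
          _ = 2 ^ (rows.length - 8 * (bIdx + 1)) * 2 ^ 8 := hsplit
      · have : x < 2 ^ 8 := by
          exact lt_of_lt_of_le hx (Nat.pow_le_pow_right (by omega) (by omega))
        have h0 : x / 2 ^ 8 = 0 := Nat.div_eq_of_lt this
        rw [h0]
        positivity
    have hcast1 : ((bIdx : Int) + 1) = (((bIdx + 1 : Nat)) : Int) := by push_cast; ring
    rw [hslice]
    simp only [hmask, hlook, hshift, hcast1]
    have hx2' : x / 2 ^ 8 < 2 ^ (8 * d) := by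
      rw [Nat.div_lt_iff_lt_mul (by positivity)]
      calc x < 2 ^ (8 * (d + 1)) := hx2
        _ = 2 ^ (8 * d) * 2 ^ 8 := by rw [← pow_add]; ring_nf
    rw [ih (bIdx + 1) (x / 2 ^ 8) _ (by omega) hx' hx2']
    rw [pvScan_split8 rows (8 * bIdx) x, ← pvBxor_assoc]
    have h256 : x % 2 ^ 8 < 2 ^ 8 := Nat.mod_lt _ (by positivity)
    have h88 : 8 * bIdx + 8 = 8 * (bIdx + 1) := by ring
    rw [hxmod, pvScan_take rows 8 (8 * bIdx) (x % 2 ^ 8) h256, h88]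

-- the running maximum in B's maxbits loop dominates every bit length seen
lemma pvMaxbits_le (l : List Int) :
    ∀ (init : Int),
      init ≤ l.foldl
        (fun mb a => if ((PySem.Int.bitLength a : Nat) : Int) > mb then ((PySem.Int.bitLength a : Nat) : Int) else mb) init := by
  induction l with
  | nil => intro init; simp
  | cons a l ih =>
    intro init
    rw [List.foldl_cons]
    refine le_trans ?_ (ih _)
    split <;> omega

lemma pvMaxbits_ge (l : List Int) :
    ∀ (init : Int) (a : Int), a ∈ l →
      ((PySem.Int.bitLength a : Nat) : Int) ≤ l.foldl
        (fun mb a => if ((PySem.Int.bitLength a : Nat) : Int) > mb then ((PySem.Int.bitLength a : Nat) : Int) else mb) init := by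
  induction l with
  | nil => intro _ _ h; exact absurd h (by simp)
  | cons b l ih =>
    intro init a ha
    rcases List.mem_cons.mp ha with rfl | ha'
    · rw [List.foldl_cons]
      refine le_trans ?_ (pvMaxbits_le l _)
      split <;> omega
    · rw [List.foldl_cons]
      exact ih _ a ha'

-- ===== VERDICT (by name: the statement is the Claim_ definition above) =====
theorem mat_left_mul_spec : Claim_equal_mat_left_mul := by
  intro A_rows B_rows k _ hpre
  unfold Spec_mat_left_mul mat_left_mul mat_left_mul_alt
  simp only []
  set MB := A_rows.foldl
    (fun mb a => if ((PySem.Int.bitLength a : Nat) : Int) > mb then ((PySem.Int.bitLength a : Nat) : Int) else mb) 0 with hMB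
  have hMB0 : 0 ≤ MB := pvMaxbits_le A_rows 0
  set mbN : Nat := MB.toNat with hmbN
  have hMBcast : MB = (mbN : Int) := by omega
  have hnb : PySem.Int.floordiv ((B_rows.length : Int) + 8 - 1) 8
      = (((B_rows.length + 7) / 8 : Nat) : Int) := by
    have : (B_rows.length : Int) + 8 - 1 = (((B_rows.length + 7 : Nat)) : Int) := by
      push_cast; ring
    rw [this]
    exact_mod_cast PySem.Int.floordiv_natCast (B_rows.length + 7) 8
  have hnb2 : PySem.Int.floordiv (MB + 8 - 1) 8 = (((mbN + 7) / 8 : Nat) : Int) := by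
    have : MB + 8 - 1 = (((mbN + 7 : Nat)) : Int) := by
      rw [hMBcast]; push_cast; ring
    rw [this]
    exact_mod_cast PySem.Int.floordiv_natCast (mbN + 7) 8
  set E : Nat := min ((B_rows.length + 7) / 8) ((mbN + 7) / 8) with hE
  have hmin : min (PySem.Int.floordiv ((B_rows.length : Int) + 8 - 1) 8)
      (PySem.Int.floordiv (MB + 8 - 1) 8) = ((E : Nat) : Int) := by
    rw [hnb, hnb2, hE, Nat.cast_min]
  apply List.map_congr_left
  intro a hmem
  obtain ⟨h0, hlt⟩ := hpre a hmem
  obtain ⟨m, rfl⟩ : ∃ m : Nat, a = (m : Int) := ⟨a.toNat, by omega⟩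
  have hA := inner_bridge B_rows m 0 0 (m + 1) (by omega)
  rw [Nat.shiftLeft_zero] at hA
  have hmn : m < 2 ^ B_rows.length := by
    exact_mod_cast (by push_cast at hlt ⊢; exact_mod_cast hlt :
      (m : Int) < ((2 ^ B_rows.length : Nat) : Int))
  have hm : m < 2 ^ (B_rows.length - 8 * 0) := by
    simpa using hmn
  -- m is below 2^(8E): via its own bit length for the maxbits bound, and via hmn
  have hbl : PySem.Int.bitLength ((m : Nat) : Int) ≤ mbN := by
    have h1 := pvMaxbits_ge A_rows 0 ((m : Nat) : Int) hmem
    rw [← hMB] at h1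
    omega
  have hm8 : m < 2 ^ (8 * E) := by
    rcases Nat.le_total ((B_rows.length + 7) / 8) ((mbN + 7) / 8) with hle | hle
    · have hEeq : E = (B_rows.length + 7) / 8 := by rw [hE]; omega
      calc m < 2 ^ B_rows.length := hmn
        _ ≤ 2 ^ (8 * E) := by
            apply Nat.pow_le_pow_right (by omega)
            omega
    · have hEeq : E = (mbN + 7) / 8 := by rw [hE]; omega
      have hm1 : m < 2 ^ PySem.Int.bitLength ((m : Nat) : Int) := by
        have := PySem.Int.lt_two_pow_bitLength ((m : Nat) : Int)
        simpa using this
      calc m < 2 ^ PySem.Int.bitLength ((m : Nat) : Int) := hm1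
        _ ≤ 2 ^ (8 * E) := by
            apply Nat.pow_le_pow_right (by omega)
            omega
  have hB := pvFold_eq_scan B_rows E (by rw [hE]; omega) E 0 m 0 (by omega) hm hm8
  simp only [Nat.mul_zero, Nat.cast_zero] at hB
  rw [List.foldl_map, hmin]
  simp only [Int.natAbs_natCast] at hA ⊢
  rw [hA, hB]
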